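-- pv_equiv track=rewrite | github.com/Ostap2003/6.-Analysis-of-relations | find_symetric_relation.py | find_symmetric_relation
-- ===== SOURCE A (Python) =====
-- def find_symmetric_relation(matrix: list) -> list:
--     """
--     Return a matrix of symmetric closure of the relation.
--     >>> find_symmetric_relation([[0, 1, 1], [0, 0, 0], [1, 1, 1]])
--     [[0, 1, 1], [1, 0, 1], [1, 1, 1]]
--     """
--     for row in range(len(matrix)):
--         for num in range(len(matrix)):
--             if matrix[row][num] == 1 and matrix[num][row] != 1:
--                 matrix[num][row] = 1  # if el (a, b) in matrix, add element (b, a)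
--             elif matrix[row][num] != 1 and matrix[num][row] == 1:
--                 matrix[row][num] = 1  # if el (b, a) in matrix, add element (a, b)
--     return matrix
-- ===== SOURCE B (Python) =====
-- def find_symmetric_relation(matrix: list) -> list:
--     """Symmetric closure via an edge list: one read pass collects the
--     coordinates of all 1-entries, then each recorded edge (i, j) is
--     symmetrized by writing 1 into both (i, j) and (j, i).
--     Mutates matrix in place like the original."""
--     n = len(matrix)
--     ones = [(i, j) for i in range(n) for j in range(n) if matrix[i][j] == 1]
--     for i, j in ones:
--         matrix[i][j] = 1
--         matrix[j][i] = 1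
--     return matrix
-- ===== Notes on version B (the rewrite author's own statement) =====
-- stated objective: faster
-- what changed: B switches to an edge-list representation: one read-only pass collects the coordinates of all 1-entries, then a second pass symmetrizes each recorded edge by writing 1 into both (i,j) and (j,i), replacing A's conditional mirror-cell updates on the evolving matrix.
import Mathlib
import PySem

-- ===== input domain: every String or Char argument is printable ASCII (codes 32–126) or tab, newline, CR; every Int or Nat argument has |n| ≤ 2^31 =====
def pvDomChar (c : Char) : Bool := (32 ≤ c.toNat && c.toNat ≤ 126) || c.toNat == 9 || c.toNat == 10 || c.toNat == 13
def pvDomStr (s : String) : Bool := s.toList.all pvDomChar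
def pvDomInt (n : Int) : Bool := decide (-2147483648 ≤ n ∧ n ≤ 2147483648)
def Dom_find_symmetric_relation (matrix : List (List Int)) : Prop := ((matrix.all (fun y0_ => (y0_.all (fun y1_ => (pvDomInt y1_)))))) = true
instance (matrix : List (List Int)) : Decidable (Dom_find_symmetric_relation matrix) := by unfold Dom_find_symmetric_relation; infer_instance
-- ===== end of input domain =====

-- B replaces A's conditional mirror-cell updates by an edge-list algorithm: one read
-- pass collects the coordinates of all 1-entries, then each recorded edge is
-- symmetrized by writing both cells (same O(n^2) cost); both Pythons mutate `matrix`
-- in place, the equivalence proved here is about the return value.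

-- matrix[i][j] read (exact under Pre_: every index the ports use is in range)
def pvGet2 (m : List (List Int)) (i j : Nat) : Int := (m.getD i []).getD j 0

-- matrix[i][j] = v (exact under Pre_: every index the ports use is in range)
def pvSet2 (m : List (List Int)) (i j : Nat) (v : Int) : List (List Int) :=
  m.set i ((m.getD i []).set j v)

-- ===== PORT A =====
def find_symmetric_relation (matrix : List (List Int)) : List (List Int) :=
  (List.range matrix.length).foldl (fun m row =>
    (List.range matrix.length).foldl (fun m num =>
      if pvGet2 m row num = 1 ∧ pvGet2 m num row ≠ 1 then pvSet2 m num row 1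
      else if pvGet2 m row num ≠ 1 ∧ pvGet2 m num row = 1 then pvSet2 m row num 1
      else m) m) matrix

-- ===== PORT B =====
-- the comprehension [(i, j) for i in range(n) for j in range(n) if matrix[i][j] == 1]
def pvOnes (matrix : List (List Int)) : List (Nat × Nat) :=
  (List.range matrix.length).flatMap (fun i =>
    ((List.range matrix.length).filter (fun j => pvGet2 matrix i j == 1)).map (fun j => (i, j)))

def find_symmetric_relation_alt (matrix : List (List Int)) : List (List Int) :=
  (pvOnes matrix).foldl (fun m p => pvSet2 (pvSet2 m p.1 p.2 1) p.2 p.1 1) matrix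

-- ===== PRECONDITION & SPEC =====
-- Pre_ excludes ragged matrices (some row shorter than the number of rows), on which
-- the Python A raises IndexError (and B does too).
def Pre_find_symmetric_relation (matrix : List (List Int)) : Prop :=
  ∀ row ∈ matrix, matrix.length ≤ row.length
instance (matrix : List (List Int)) : Decidable (Pre_find_symmetric_relation matrix) := by
  unfold Pre_find_symmetric_relation; infer_instance

def pvWitness_find_symmetric_relation : List (List Int) := [[0, 1], [0, 0]]

def Spec_find_symmetric_relation (matrix : List (List Int)) (out : List (List Int)) : Prop := out = find_symmetric_relation_alt matrix
instance (matrix : List (List Int)) (out : List (List Int)) : Decidable (Spec_find_symmetric_relation matrix out) := by unfold Spec_find_symmetric_relation; infer_instance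

-- ===== CLAIM (what is proved, stated in full; the proofs are below) =====
def Claim_equal_find_symmetric_relation : Prop := ∀ (matrix : List (List Int)), Dom_find_symmetric_relation matrix → Pre_find_symmetric_relation matrix → Spec_find_symmetric_relation matrix (find_symmetric_relation matrix)

-- ===== LEMMAS AND PROOFS =====

-- the symmetric-closure value of cell (i, j) of the original matrix
def pvSym (mat : List (List Int)) (i j : Nat) : Int :=
  if pvGet2 mat i j = 1 ∨ pvGet2 mat j i = 1 then 1 else pvGet2 mat i j

lemma pvSym_eq_one_iff (mat : List (List Int)) (i j : Nat) :
    pvSym mat i j = 1 ↔ (pvGet2 mat i j = 1 ∨ pvGet2 mat j i = 1) := by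
  unfold pvSym
  split_ifs with h
  · exact ⟨fun _ => h, fun _ => rfl⟩
  · exact ⟨fun hx => Or.inl hx, fun hx => absurd hx h⟩

-- loop invariant: shape of `mat`, untouched outside the n×n block, inside the block
-- symmetrically closed on the touched set T and original off it
def pvInv (mat m : List (List Int)) (T : Nat → Nat → Prop) : Prop :=
  m.length = mat.length ∧
  (∀ k, (m.getD k []).length = (mat.getD k []).length) ∧
  (∀ i j, mat.length ≤ j → pvGet2 m i j = pvGet2 mat i j) ∧
  (∀ i j, i < mat.length → j < mat.length → T i j → pvGet2 m i j = pvSym mat i j) ∧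
  (∀ i j, i < mat.length → j < mat.length → ¬ T i j → pvGet2 m i j = pvGet2 mat i j)

lemma pvInv_init (mat : List (List Int)) (T : Nat → Nat → Prop)
    (hT : ∀ i j, i < mat.length → j < mat.length → ¬ T i j) :
    pvInv mat mat T :=
  ⟨rfl, fun _ => rfl, fun _ _ _ => rfl,
    fun i j hi hj ht => absurd ht (hT i j hi hj), fun _ _ _ _ _ => rfl⟩

lemma pvInv_congr (mat m : List (List Int)) (T T' : Nat → Nat → Prop)
    (h : pvInv mat m T)
    (hT : ∀ i j, i < mat.length → j < mat.length → (T i j ↔ T' i j)) :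
    pvInv mat m T' := by
  obtain ⟨h1, h2, h3, h4, h5⟩ := h
  exact ⟨h1, h2, h3,
    fun i j hi hj ht => h4 i j hi hj ((hT i j hi hj).2 ht),
    fun i j hi hj ht => h5 i j hi hj (fun hx => ht ((hT i j hi hj).1 hx))⟩

-- a cell whose current value already equals its closure value may be marked touched
lemma pvInv_retag (mat m : List (List Int)) (T : Nat → Nat → Prop)
    (h : pvInv mat m T) (a b : Nat)
    (hv : pvGet2 m a b = pvSym mat a b) :
    pvInv mat m (fun x y => T x y ∨ (x = a ∧ y = b)) := by
  obtain ⟨h1, h2, h3, h4, h5⟩ := h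
  refine ⟨h1, h2, h3, fun i j hi hj ht => ?_,
    fun i j hi hj ht => h5 i j hi hj (fun hx => ht (Or.inl hx))⟩
  rcases ht with ht | ⟨rfl, rfl⟩
  · exact h4 i j hi hj ht
  · exact hv

lemma pvGetD_set {α : Type} (l : List α) (i : Nat) (x : α) (d : α) (k : Nat) :
    (l.set i x).getD k d = if i = k ∧ i < l.length then x else l.getD k d := by
  simp only [List.getD_eq_getElem?_getD, List.getElem?_set]
  by_cases h1 : i = k
  · subst h1
    by_cases h2 : i < l.length
    · simp [h2]
    · simp [h2]
  · simp [h1]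

lemma pvGet2_set2 (m : List (List Int)) (i j : Nat) (v : Int) (a b : Nat)
    (hi : i < m.length) (hj : j < (m.getD i []).length) :
    pvGet2 (pvSet2 m i j v) a b = if a = i ∧ b = j then v else pvGet2 m a b := by
  unfold pvGet2 pvSet2
  rw [pvGetD_set]
  rcases eq_or_ne a i with rfl | hai
  · rw [if_pos ⟨rfl, hi⟩, pvGetD_set]
    rcases eq_or_ne b j with rfl | hbj
    · rw [if_pos ⟨rfl, hj⟩, if_pos ⟨rfl, rfl⟩]
    · rw [if_neg (by intro hx; exact hbj hx.1.symm),
        if_neg (by intro hx; exact hbj hx.2)]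
  · rw [if_neg (by intro hx; exact hai hx.1.symm),
      if_neg (by intro hx; exact hai hx.1)]

lemma pvSet2_length (m : List (List Int)) (i j : Nat) (v : Int) :
    (pvSet2 m i j v).length = m.length := by simp [pvSet2]

lemma pvSet2_rowlen (m : List (List Int)) (i j : Nat) (v : Int) (k : Nat) :
    ((pvSet2 m i j v).getD k []).length = ((m.getD k []).length) := by
  unfold pvSet2
  rw [pvGetD_set]
  by_cases h : i = k ∧ i < m.length
  · rw [if_pos h, ← h.1]
    simp
  · rw [if_neg h]

-- writing the closure value into an in-range cell extends the touched set by that cell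
lemma pvInv_set2 (mat m : List (List Int)) (T : Nat → Nat → Prop)
    (h : pvInv mat m T) (i j : Nat) (hi : i < mat.length) (hj : j < mat.length)
    (hpre : Pre_find_symmetric_relation mat) (v : Int) (hv : v = pvSym mat i j) :
    pvInv mat (pvSet2 m i j v) (fun a b => T a b ∨ (a = i ∧ b = j)) := by
  obtain ⟨h1, h2, h3, h4, h5⟩ := h
  have hjr : j < (m.getD i []).length := by
    rw [h2 i]
    have hmem : mat.getD i [] ∈ mat := by
      rw [List.getD_eq_getElem _ _ hi]; exact List.getElem_mem _
    exact lt_of_lt_of_le hj (hpre _ hmem)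
  have him : i < m.length := h1 ▸ hi
  have hget := pvGet2_set2 m i j v (hi := him) (hj := hjr)
  refine ⟨by rw [pvSet2_length, h1], fun k => by rw [pvSet2_rowlen]; exact h2 k,
    fun a b hb => ?_, fun a b ha hb ht => ?_, fun a b ha hb ht => ?_⟩
  · rw [hget a b, if_neg (by intro hx; exact absurd (hx.2 ▸ hb) (Nat.not_le.2 hj))]
    exact h3 a b hb
  · rw [hget a b]
    by_cases hc : a = i ∧ b = j
    · obtain ⟨rfl, rfl⟩ := hc
      rw [if_pos ⟨rfl, rfl⟩, hv]
    · rw [if_neg hc]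
      exact h4 a b ha hb (ht.elim id (fun hx => absurd hx hc))
  · rw [hget a b, if_neg (fun hx => ht (Or.inr hx))]
    exact h5 a b ha hb (fun hx => ht (Or.inl hx))

lemma foldl_range_inv {α : Type} (f : α → Nat → α) (P : Nat → α → Prop)
    (n : Nat) (a : α) (h0 : P 0 a)
    (hs : ∀ c b, c < n → P c b → P (c + 1) (f b c)) :
    P n ((List.range n).foldl f a) := by
  induction n with
  | zero => simpa using h0
  | succ k ih =>
    rw [List.range_succ, List.foldl_append]
    exact hs k _ (Nat.lt_succ_self k)
      (ih (fun c b hc => hs c b (Nat.lt_succ_of_lt hc)))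

-- extensionality through pvGet2
lemma pvExt (m1 m2 : List (List Int)) (hl : m1.length = m2.length)
    (hr : ∀ k, (m1.getD k []).length = (m2.getD k []).length)
    (hg : ∀ i j, pvGet2 m1 i j = pvGet2 m2 i j) : m1 = m2 := by
  apply List.ext_getElem hl
  intro i hi1 hi2
  apply List.ext_getElem
  · have := hr i
    rwa [List.getD_eq_getElem _ _ hi1, List.getD_eq_getElem _ _ hi2] at this
  · intro j hj1 hj2
    have := hg i j
    unfold pvGet2 at this
    rwa [List.getD_eq_getElem _ _ hi1, List.getD_eq_getElem _ _ hi2,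
      List.getD_eq_getElem _ _ hj1, List.getD_eq_getElem _ _ hj2] at this

lemma row_long (mat : List (List Int)) (hpre : Pre_find_symmetric_relation mat)
    (k : Nat) (hk : k < mat.length) : mat.length ≤ (mat.getD k []).length := by
  have hmem : mat.getD k [] ∈ mat := by
    rw [List.getD_eq_getElem _ _ hk]; exact List.getElem_mem _
  exact hpre _ hmem

-- one step of A's inner loop preserves/extends the invariant
lemma stepA_inv (mat : List (List Int)) (hpre : Pre_find_symmetric_relation mat)
    (r c : Nat) (hr : r < mat.length) (hc : c < mat.length) (m' : List (List Int))
    (hm' : pvInv mat m' (fun i j => i < r ∨ j < r ∨ (i = r ∧ j < c) ∨ (j = r ∧ i < c))) :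
    pvInv mat
      (if pvGet2 m' r c = 1 ∧ pvGet2 m' c r ≠ 1 then pvSet2 m' c r 1
       else if pvGet2 m' r c ≠ 1 ∧ pvGet2 m' c r = 1 then pvSet2 m' r c 1
       else m')
      (fun i j => i < r ∨ j < r ∨ (i = r ∧ j < c + 1) ∨ (j = r ∧ i < c + 1)) := by
  by_cases hcr : c < r
  · -- pair already closed: both branches are no-ops
    have hvrc : pvGet2 m' r c = pvSym mat r c :=
      hm'.2.2.2.1 r c hr hc (by omega)
    have hvcr : pvGet2 m' c r = pvSym mat c r :=
      hm'.2.2.2.1 c r hc hr (by omega)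
    have hsym : pvSym mat r c = 1 ↔ pvSym mat c r = 1 := by
      rw [pvSym_eq_one_iff, pvSym_eq_one_iff]; tauto
    rw [if_neg (by rw [hvrc, hvcr]; intro ⟨hx, hy⟩; exact hy (hsym.1 hx)),
      if_neg (by rw [hvrc, hvcr]; intro ⟨hx, hy⟩; exact hx (hsym.2 hy))]
    exact pvInv_congr mat m' _ _ hm' (fun i j hi hj => by omega)
  · -- pair untouched: current values are the originals
    have hvrc : pvGet2 m' r c = pvGet2 mat r c :=
      hm'.2.2.2.2 r c hr hc (by omega)
    have hvcr : pvGet2 m' c r = pvGet2 mat c r :=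
      hm'.2.2.2.2 c r hc hr (by omega)
    by_cases h1 : pvGet2 mat r c = 1 <;> by_cases h2 : pvGet2 mat c r = 1
    · -- both 1: no-op, both cells already at their closure value
      rw [if_neg (by rw [hvcr]; intro ⟨_, hx⟩; exact hx h2),
        if_neg (by rw [hvrc]; intro ⟨hx, _⟩; exact hx h1)]
      have := pvInv_retag mat m' _
        (pvInv_retag mat m' _ hm' r c
          (by rw [hvrc, h1]; exact ((pvSym_eq_one_iff mat r c).2 (Or.inl h1)).symm))
        c r (by rw [hvcr, h2]; exact ((pvSym_eq_one_iff mat c r).2 (Or.inl h2)).symm)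
      exact pvInv_congr mat m' _ _ this (fun i j hi hj => by omega)
    · -- (r,c)=1, mirror ≠1: first branch writes the mirror
      rw [if_pos (by rw [hvrc, hvcr]; exact ⟨h1, h2⟩)]
      have hne : r ≠ c := fun h => h2 (h ▸ h1)
      have hset := pvInv_set2 mat m' _ hm' c r hc hr hpre 1
        (((pvSym_eq_one_iff mat c r).2 (Or.inr h1)).symm)
      have hmir : pvGet2 (pvSet2 m' c r 1) r c = pvSym mat r c := by
        rw [pvGet2_set2 m' c r 1 r c (hm'.1 ▸ hc)
            (by rw [hm'.2.1 c]; exact lt_of_lt_of_le hr (row_long mat hpre c hc)),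
          if_neg (by intro h; exact hne h.1), hvrc, h1]
        exact ((pvSym_eq_one_iff mat r c).2 (Or.inl h1)).symm
      have := pvInv_retag mat _ _ hset r c hmir
      exact pvInv_congr mat _ _ _ this (fun i j hi hj => by omega)
    · -- (r,c)≠1, mirror =1: second branch writes (r,c)
      rw [if_neg (by rw [hvrc]; intro ⟨hx, _⟩; exact h1 hx),
        if_pos (by rw [hvrc, hvcr]; exact ⟨h1, h2⟩)]
      have hne : r ≠ c := fun h => h1 (h ▸ h2)
      have hset := pvInv_set2 mat m' _ hm' r c hr hc hpre 1
        (((pvSym_eq_one_iff mat r c).2 (Or.inr h2)).symm)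
      have hmir : pvGet2 (pvSet2 m' r c 1) c r = pvSym mat c r := by
        rw [pvGet2_set2 m' r c 1 c r (hm'.1 ▸ hr)
            (by rw [hm'.2.1 r]; exact lt_of_lt_of_le hc (row_long mat hpre r hr)),
          if_neg (by intro h; exact hne h.2), hvcr, h2]
        exact ((pvSym_eq_one_iff mat c r).2 (Or.inl h2)).symm
      have := pvInv_retag mat _ _ hset c r hmir
      exact pvInv_congr mat _ _ _ this (fun i j hi hj => by omega)
    · -- neither 1: no-op, closure values equal the originals
      rw [if_neg (by rw [hvrc]; intro ⟨hx, _⟩; exact h1 hx),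
        if_neg (by rw [hvcr]; intro ⟨_, hx⟩; exact h2 hx)]
      have hs1 : pvSym mat r c = pvGet2 mat r c := by
        unfold pvSym; rw [if_neg (fun h => h.elim h1 h2)]
      have hs2 : pvSym mat c r = pvGet2 mat c r := by
        unfold pvSym; rw [if_neg (fun h => h.elim h2 h1)]
      have := pvInv_retag mat m' _
        (pvInv_retag mat m' _ hm' r c (by rw [hvrc, hs1]))
        c r (by rw [hvcr, hs2])
      exact pvInv_congr mat m' _ _ this (fun i j hi hj => by omega)

-- A's loops establish the invariant with the full block touched
lemma portA_inv (mat : List (List Int)) (hpre : Pre_find_symmetric_relation mat) :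
    pvInv mat (find_symmetric_relation mat) (fun i j => i < mat.length ∨ j < mat.length) := by
  unfold find_symmetric_relation
  apply foldl_range_inv _ (fun r m => pvInv mat m (fun i j => i < r ∨ j < r))
  · exact pvInv_init mat _ (fun i j _ _ h => by omega)
  · intro r m hr hm
    have hinner := foldl_range_inv
      (fun m num =>
        if pvGet2 m r num = 1 ∧ pvGet2 m num r ≠ 1 then pvSet2 m num r 1
        else if pvGet2 m r num ≠ 1 ∧ pvGet2 m num r = 1 then pvSet2 m r num 1
        else m)
      (fun c m => pvInv mat m
        (fun i j => i < r ∨ j < r ∨ (i = r ∧ j < c) ∨ (j = r ∧ i < c)))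
      mat.length m
      (pvInv_congr mat m _ _ hm (fun i j _ _ => by omega))
      (fun c m' hc hm' => stepA_inv mat hpre r c hr hc m' hm')
    exact pvInv_congr mat _ _ _ hinner (fun i j hi hj => by omega)

-- membership in the edge list
lemma mem_pvOnes (mat : List (List Int)) (i j : Nat) :
    (i, j) ∈ pvOnes mat ↔ i < mat.length ∧ j < mat.length ∧ pvGet2 mat i j = 1 := by
  simp only [pvOnes, List.mem_flatMap, List.mem_map, List.mem_filter, List.mem_range,
    beq_iff_eq, Prod.mk.injEq]
  constructor
  · rintro ⟨a, ha, b, ⟨hb, hv⟩, rfl, rfl⟩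
    exact ⟨ha, hb, hv⟩
  · rintro ⟨hi, hj, hv⟩
    exact ⟨i, hi, j, ⟨hj, hv⟩, rfl, rfl⟩

-- folding B's double write over any list of 1-edges extends the touched set by the
-- edges and their mirrors
lemma foldOnes_inv (mat : List (List Int)) (hpre : Pre_find_symmetric_relation mat)
    (l : List (Nat × Nat))
    (hl : ∀ p ∈ l, p.1 < mat.length ∧ p.2 < mat.length ∧ pvGet2 mat p.1 p.2 = 1)
    (m : List (List Int)) (T : Nat → Nat → Prop) (hm : pvInv mat m T) :
    pvInv mat (l.foldl (fun m p => pvSet2 (pvSet2 m p.1 p.2 1) p.2 p.1 1) m)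
      (fun a b => T a b ∨ ∃ p ∈ l, (a = p.1 ∧ b = p.2) ∨ (a = p.2 ∧ b = p.1)) := by
  induction l generalizing m T with
  | nil =>
    exact pvInv_congr mat m T _ hm (fun i j _ _ => by simp)
  | cons p t ih =>
    obtain ⟨hp1, hp2, hp3⟩ := hl p (List.mem_cons_self ..)
    have h1 := pvInv_set2 mat m T hm p.1 p.2 hp1 hp2 hpre 1
      (((pvSym_eq_one_iff mat p.1 p.2).2 (Or.inl hp3)).symm)
    have h2 := pvInv_set2 mat _ _ h1 p.2 p.1 hp2 hp1 hpre 1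
      (((pvSym_eq_one_iff mat p.2 p.1).2 (Or.inr hp3)).symm)
    have h3 := ih (fun q hq => hl q (List.mem_cons_of_mem _ hq)) _ _ h2
    refine pvInv_congr mat _ _ _ h3 (fun i j _ _ => ?_)
    simp only [List.mem_cons]
    constructor
    · rintro (((hT | ⟨rfl, rfl⟩) | ⟨rfl, rfl⟩) | ⟨q, hq, hor⟩)
      · exact Or.inl hT
      · exact Or.inr ⟨p, Or.inl rfl, Or.inl ⟨rfl, rfl⟩⟩
      · exact Or.inr ⟨p, Or.inl rfl, Or.inr ⟨rfl, rfl⟩⟩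
      · exact Or.inr ⟨q, Or.inr hq, hor⟩
    · rintro (hT | ⟨q, (rfl | hq), hor⟩)
      · exact Or.inl (Or.inl (Or.inl hT))
      · rcases hor with ⟨rfl, rfl⟩ | ⟨rfl, rfl⟩
        · exact Or.inl (Or.inl (Or.inr ⟨rfl, rfl⟩))
        · exact Or.inl (Or.inr ⟨rfl, rfl⟩)
      · exact Or.inr ⟨q, hq, hor⟩

-- untouched in-range cells keep their closure value when neither mirror is 1
lemma pvInv_full (mat m : List (List Int)) (T : Nat → Nat → Prop)
    (h : pvInv mat m T)
    (hsym : ∀ i j, i < mat.length → j < mat.length → ¬ T i j →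
      pvSym mat i j = pvGet2 mat i j) :
    pvInv mat m (fun i j => i < mat.length ∨ j < mat.length) := by
  obtain ⟨h1, h2, h3, h4, h5⟩ := h
  refine ⟨h1, h2, h3, fun i j hi hj _ => ?_, fun i j hi _ hx => absurd (Or.inl hi) hx⟩
  by_cases ht : T i j
  · exact h4 i j hi hj ht
  · rw [h5 i j hi hj ht, hsym i j hi hj ht]

-- B's two passes establish the same invariant
lemma portB_inv (mat : List (List Int)) (hpre : Pre_find_symmetric_relation mat) :
    pvInv mat (find_symmetric_relation_alt mat) (fun i j => i < mat.length ∨ j < mat.length) := by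
  unfold find_symmetric_relation_alt
  have hfold := foldOnes_inv mat hpre (pvOnes mat)
    (fun p hp => (mem_pvOnes mat p.1 p.2).1 hp)
    mat (fun _ _ => False) (pvInv_init mat _ (fun _ _ _ _ h => h))
  refine pvInv_full mat _ _ hfold (fun i j hi hj ht => ?_)
  unfold pvSym
  rw [if_neg ?_]
  intro hor
  apply ht
  rcases hor with hv | hv
  · exact Or.inr ⟨(i, j), (mem_pvOnes mat i j).2 ⟨hi, hj, hv⟩, Or.inl ⟨rfl, rfl⟩⟩
  · exact Or.inr ⟨(j, i), (mem_pvOnes mat j i).2 ⟨hj, hi, hv⟩, Or.inr ⟨rfl, rfl⟩⟩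

lemma pvGet2_out (m : List (List Int)) (i j : Nat) (h : m.length ≤ i) :
    pvGet2 m i j = 0 := by
  unfold pvGet2
  rw [List.getD_eq_default _ _ h]
  simp

-- ===== VERDICT (by name: the statement is the Claim_ definition above) =====
theorem find_symmetric_relation_spec : Claim_equal_find_symmetric_relation := by
  intro mat _ hpre
  unfold Spec_find_symmetric_relation
  obtain ⟨a1, a2, a3, a4, a5⟩ := portA_inv mat hpre
  obtain ⟨b1, b2, b3, b4, b5⟩ := portB_inv mat hpre
  apply pvExt
  · rw [a1, b1]
  · intro k; rw [a2 k, b2 k]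
  · intro i j
    rcases Nat.lt_or_ge j mat.length with hj | hj
    · rcases Nat.lt_or_ge i mat.length with hi | hi
      · rw [a4 i j hi hj (Or.inl hi), b4 i j hi hj (Or.inl hi)]
      · rw [pvGet2_out _ _ _ (a1 ▸ hi), pvGet2_out _ _ _ (b1 ▸ hi)]
    · rw [a3 i j hj, b3 i j hj]
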